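-- pv_equiv track=rewrite | github.com/aemidius/CometLocal | backend/agents/agent_runner.py | _extract_wikipedia_title_from_goal
-- ===== SOURCE A (Python) =====
-- from typing import List, Optional, Tuple, Dict, Any
--
-- def _extract_wikipedia_title_from_goal(goal: str) -> Optional[str]:
--     """
--     Extrae un candidato de título de artículo a partir del objetivo textual.
--
--     Busca palabras capitalizadas al final del texto (después de eliminar "en wikipedia").
--     """
--     goal_lower = goal.lower()
--
--     # Buscar y recortar "en wikipedia" o "en la wikipedia"
--     topic_part = goal
--     for suffix in [" en wikipedia", " en la wikipedia"]:
--         if goal_lower.endswith(suffix):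
--             topic_part = goal[:len(goal) - len(suffix)].strip()
--             break
--
--     # Si no encontramos el sufijo, usar todo el texto
--     if topic_part == goal:
--         topic_part = goal.strip()
--
--     # Dividir en tokens
--     tokens = topic_part.split()
--     if not tokens:
--         return None
--
--     # Recorrer desde el final hacia atrás, acumulando palabras capitalizadas
--     accumulated = []
--     short_connectors = {"de", "del", "la", "el", "y", "en"}
--
--     for token in reversed(tokens):
--         # Limpiar puntuación del token
--         clean_token = token.strip(" ,;.")
--         if not clean_token:
--             continue
--
--         # Si es una palabra corta conectora, la incluimos para no cortar apellidos compuestos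
--         if clean_token.lower() in short_connectors:
--             accumulated.append(clean_token)
--             continue
--
--         # Si la primera letra es alfabética y mayúscula, es un nombre propio
--         if clean_token[0].isalpha() and clean_token[0].isupper():
--             accumulated.append(clean_token)
--         else:
--             # Si encontramos una palabra no capitalizada, paramos
--             break
--
--     if not accumulated:
--         return None
--
--     # Invertir para obtener el orden normal
--     title = " ".join(reversed(accumulated))
--     # Limpiar comas o puntos finales
--     title = title.strip(" ,;.")
--
--     return title if title else None
-- ===== SOURCE B (Python) =====
-- def _extract_wikipedia_title_from_goal(goal):
--     goal_lower = goal.lower()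
--     topic_part = goal
--     for suffix in [" en wikipedia", " en la wikipedia"]:
--         if goal_lower.endswith(suffix):
--             topic_part = goal[:len(goal) - len(suffix)].strip()
--             break
--     if topic_part == goal:
--         topic_part = goal.strip()
--     tokens = topic_part.split()
--     connectors = {"de", "del", "la", "el", "y", "en"}
--     kept = []
--     for token in tokens:
--         clean = token.strip(" ,;.")
--         if not clean:
--             continue
--         if clean.lower() in connectors or (clean[0].isalpha() and clean[0].isupper()):
--             kept.append(clean)
--         else:
--             kept = []
--     title = " ".join(kept).strip(" ,;.")
--     return title if title else None
-- ===== Notes on version B (the rewrite author's own statement) =====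
-- stated objective: simpler
-- what changed: A's reversed scan that breaks at the first non-qualifying token is replaced by a single forward pass whose accumulator is reset after each non-qualifying token, so no reversal of the token list or of the result is needed.
import Mathlib
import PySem

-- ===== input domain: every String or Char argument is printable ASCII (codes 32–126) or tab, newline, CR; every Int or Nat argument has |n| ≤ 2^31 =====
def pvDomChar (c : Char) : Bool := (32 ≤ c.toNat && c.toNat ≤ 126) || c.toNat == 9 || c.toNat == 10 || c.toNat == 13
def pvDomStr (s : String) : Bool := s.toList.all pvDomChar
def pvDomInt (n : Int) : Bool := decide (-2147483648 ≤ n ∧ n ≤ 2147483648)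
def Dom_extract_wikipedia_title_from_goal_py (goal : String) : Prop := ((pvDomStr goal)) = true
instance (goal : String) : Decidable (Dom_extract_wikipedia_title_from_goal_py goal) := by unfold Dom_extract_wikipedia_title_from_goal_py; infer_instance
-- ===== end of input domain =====

-- B replaces A's reversed scan with break by a single forward pass that resets its
-- accumulator at each non-qualifying token (objective: simpler, same cost).

-- shared prelude (identical in both Pythons): suffix trim + tokenize
def pvTokens (goal : String) : List String :=
  let goal_lower := PySem.Str.lower goal
  let topic_part :=
    if PySem.Str.endswith goal_lower " en wikipedia" then
      PySem.Str.strip (PySem.Str.slice goal none (some ((PySem.Str.len goal : Int) - 13)))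
    else if PySem.Str.endswith goal_lower " en la wikipedia" then
      PySem.Str.strip (PySem.Str.slice goal none (some ((PySem.Str.len goal : Int) - 16)))
    else goal
  let topic_part := if topic_part = goal then PySem.Str.strip goal else topic_part
  PySem.Str.split₀ topic_part

def pvConnectors : List String := ["de", "del", "la", "el", "y", "en"]

def pvClean (t : String) : String := PySem.Str.stripChars t " ,;."

def pvCapAlpha (c : String) : Bool :=
  ((PySem.Str.pyGet? c 0).map (fun ch => PySem.Chars.isalpha ch && PySem.Chars.isupper ch)).getD false

-- ===== PORT A =====
-- A's reversed loop with break/continue, as structural recursion over the reversed token list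
def pvScanRev : List String → List String
  | [] => []
  | t :: rest =>
    let c := pvClean t
    if c = "" then pvScanRev rest
    else if pvConnectors.contains (PySem.Str.lower c) then c :: pvScanRev rest
    else if pvCapAlpha c then c :: pvScanRev rest
    else []

def extract_wikipedia_title_from_goal_py (goal : String) : Option String :=
  let tokens := pvTokens goal
  if tokens = [] then none
  else
    let accumulated := pvScanRev tokens.reverse
    if accumulated = [] then none
    else
      let title := PySem.Str.join " " accumulated.reverse
      let title := PySem.Str.stripChars title " ,;."
      if title = "" then none else some title

-- ===== PORT B =====
-- B's forward pass: the accumulator is reset whenever a non-qualifying token appears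
def pvFwd : List String → List String → List String
  | [], kept => kept
  | t :: rest, kept =>
    let c := pvClean t
    if c = "" then pvFwd rest kept
    else if pvConnectors.contains (PySem.Str.lower c) || pvCapAlpha c then pvFwd rest (kept ++ [c])
    else pvFwd rest []

def extract_wikipedia_title_from_goal_py_alt (goal : String) : Option String :=
  let kept := pvFwd (pvTokens goal) []
  let title := PySem.Str.stripChars (PySem.Str.join " " kept) " ,;."
  if title = "" then none else some title

-- ===== PRECONDITION & SPEC =====
def Spec_extract_wikipedia_title_from_goal_py (goal : String) (out : Option String) : Prop := out = extract_wikipedia_title_from_goal_py_alt goal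
instance (goal : String) (out : Option String) : Decidable (Spec_extract_wikipedia_title_from_goal_py goal out) := by unfold Spec_extract_wikipedia_title_from_goal_py; infer_instance

-- ===== CLAIM (what is proved, stated in full; the proofs are below) =====
def Claim_equal_extract_wikipedia_title_from_goal_py : Prop := ∀ (goal : String), Dom_extract_wikipedia_title_from_goal_py goal → Spec_extract_wikipedia_title_from_goal_py goal (extract_wikipedia_title_from_goal_py goal)

-- ===== LEMMAS AND PROOFS =====

lemma pvFwd_append (xs ys : List String) (kept : List String) :
    pvFwd (xs ++ ys) kept = pvFwd ys (pvFwd xs kept) := by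
  induction xs generalizing kept with
  | nil => rfl
  | cons t rest ih =>
    simp only [List.cons_append, pvFwd]
    split_ifs <;> apply ih

-- the reverse scan, reversed, is the forward pass from an empty accumulator
lemma pvScanRev_eq_fwd (rts : List String) :
    (pvScanRev rts).reverse = pvFwd rts.reverse [] := by
  induction rts with
  | nil => rfl
  | cons t r ih =>
    rw [List.reverse_cons, pvFwd_append]
    show (pvScanRev (t :: r)).reverse = _
    simp only [pvScanRev, pvFwd]
    split_ifs <;> simp_all

lemma pv_none_of_kept_nil :
    (if PySem.Str.stripChars (PySem.Str.join " " ([] : List String)) " ,;." = "" then (none : Option String)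
     else some (PySem.Str.stripChars (PySem.Str.join " " ([] : List String)) " ,;.")) = none := by
  decide

-- ===== VERDICT (by name: the statement is the Claim_ definition above) =====
lemma pv_core (tokens : List String) :
    (if tokens = [] then (none : Option String)
     else
       if pvScanRev tokens.reverse = [] then none
       else
         if PySem.Str.stripChars (PySem.Str.join " " (pvScanRev tokens.reverse).reverse) " ,;." = "" then none
         else some (PySem.Str.stripChars (PySem.Str.join " " (pvScanRev tokens.reverse).reverse) " ,;."))
    = (if PySem.Str.stripChars (PySem.Str.join " " (pvFwd tokens [])) " ,;." = "" then none
       else some (PySem.Str.stripChars (PySem.Str.join " " (pvFwd tokens [])) " ,;.")) := by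
  have hf : pvFwd tokens [] = (pvScanRev tokens.reverse).reverse := by
    rw [pvScanRev_eq_fwd, List.reverse_reverse]
  rw [hf]
  rcases tokens with _ | ⟨t, ts⟩
  · simpa using pv_none_of_kept_nil.symm
  · simp only [reduceCtorEq, if_false]
    by_cases ha : pvScanRev (t :: ts).reverse = []
    · rw [ha]
      simpa using pv_none_of_kept_nil.symm
    · rw [if_neg ha]

theorem extract_wikipedia_title_from_goal_py_spec : Claim_equal_extract_wikipedia_title_from_goal_py := by
  intro goal _
  exact pv_core (pvTokens goal)
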